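-- pv_equiv track=rewrite | github.com/1gabrielv/Clustering | DATA/SuperDownsample_Data/export_all_clean.py | find_axis_column
-- ===== SOURCE A (Python) =====
-- def find_axis_column(cols, axis):
--     axis = axis.lower()
--     for c in cols:
--         if c.lower() == axis:
--             return c
--     for c in cols:
--         cl = c.lower()
--         if cl.endswith('_' + axis) or cl.startswith(axis + '_'):
--             return c
--     for c in cols:
--         cl = c.lower()
--         if (' ' + axis + ' ') in (' ' + cl + ' '):
--             return c
--     for c in cols:
--         if len(c) == 1 and c.lower() == axis:
--             return c
--     return None
-- ===== SOURCE B (Python) =====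
-- def find_axis_column(cols, axis):
--     axis = axis.lower()
--
--     def rank(c):
--         cl = c.lower()
--         if cl == axis:
--             return 1
--         if cl.endswith('_' + axis) or cl.startswith(axis + '_'):
--             return 2
--         if (' ' + axis + ' ') in (' ' + cl + ' '):
--             return 3
--         return 4
--
--     best = None
--     best_rank = 4
--     for c in cols:
--         r = rank(c)
--         if r < best_rank:
--             best_rank, best = r, c
--     return best
-- ===== Notes on version B (the rewrite author's own statement) =====
-- stated objective: simpler
-- what changed: Replaces A's four sequential early-return scans with a single pass that scores each column with a priority rank (exact=1, prefix/suffix=2, word=3) and keeps the first column of strictly smallest rank; the dead single-char fourth tier (subsumed by the exact tier) is folded away.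
import Mathlib
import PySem

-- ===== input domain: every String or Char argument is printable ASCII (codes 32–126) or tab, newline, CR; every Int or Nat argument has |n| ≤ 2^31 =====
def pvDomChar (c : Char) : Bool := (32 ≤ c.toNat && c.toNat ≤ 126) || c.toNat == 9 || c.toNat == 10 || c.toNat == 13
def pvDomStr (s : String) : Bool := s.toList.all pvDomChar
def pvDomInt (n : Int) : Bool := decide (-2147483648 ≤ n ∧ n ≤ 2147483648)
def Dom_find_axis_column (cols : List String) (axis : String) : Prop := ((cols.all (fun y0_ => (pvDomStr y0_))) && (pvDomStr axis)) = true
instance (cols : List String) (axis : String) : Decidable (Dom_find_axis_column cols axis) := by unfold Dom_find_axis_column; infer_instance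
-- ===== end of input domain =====

-- B replaces A's four sequential early-return scans by ONE pass keeping the first column of
-- strictly smallest priority rank (objective: simpler; the dead single-char tier is folded away).

-- ===== PORT A =====
-- A's four loop predicates (strings handled on .toList via PySem.Chars, exact wrappers of Str.*)
def pvP1 (ax : List Char) (c : String) : Bool := PySem.Chars.lower c.toList == ax
def pvP2 (ax : List Char) (c : String) : Bool :=
  PySem.Chars.endswith (PySem.Chars.lower c.toList) ('_' :: ax) ||
    PySem.Chars.startswith (PySem.Chars.lower c.toList) (ax ++ ['_'])
def pvP3 (ax : List Char) (c : String) : Bool :=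
  PySem.Chars.isIn (' ' :: (ax ++ [' '])) (' ' :: (PySem.Chars.lower c.toList ++ [' ']))
def pvP4 (ax : List Char) (c : String) : Bool :=
  (PySem.Chars.len c.toList == 1) && (PySem.Chars.lower c.toList == ax)

def find_axis_column (cols : List String) (axis : String) : Option String :=
  match cols.find? (pvP1 (PySem.Chars.lower axis.toList)) with
  | some c => some c
  | none =>
    match cols.find? (pvP2 (PySem.Chars.lower axis.toList)) with
    | some c => some c
    | none =>
      match cols.find? (pvP3 (PySem.Chars.lower axis.toList)) with
      | some c => some c
      | none =>
        match cols.find? (pvP4 (PySem.Chars.lower axis.toList)) with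
        | some c => some c
        | none => none

-- ===== PORT B =====
-- priority rank of a column (1 exact, 2 prefix/suffix, 3 word match, 4 no match)
def pvRank (ax : List Char) (c : String) : Nat :=
  if PySem.Chars.lower c.toList == ax then 1
  else if PySem.Chars.endswith (PySem.Chars.lower c.toList) ('_' :: ax) ||
          PySem.Chars.startswith (PySem.Chars.lower c.toList) (ax ++ ['_']) then 2
  else if PySem.Chars.isIn (' ' :: (ax ++ [' '])) (' ' :: (PySem.Chars.lower c.toList ++ [' '])) then 3
  else 4

-- loop body: keep the current best unless a strictly smaller rank appears
def pvStep (ax : List Char) (acc : Nat × Option String) (c : String) : Nat × Option String :=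
  if pvRank ax c < acc.1 then (pvRank ax c, some c) else acc

def find_axis_column_alt (cols : List String) (axis : String) : Option String :=
  (cols.foldl (pvStep (PySem.Chars.lower axis.toList)) (4, none)).2

-- ===== PRECONDITION & SPEC =====
def Spec_find_axis_column (cols : List String) (axis : String) (out : Option String) : Prop := out = find_axis_column_alt cols axis
instance (cols : List String) (axis : String) (out : Option String) : Decidable (Spec_find_axis_column cols axis out) := by unfold Spec_find_axis_column; infer_instance

-- ===== CLAIM (what is proved, stated in full; the proofs are below) =====
def Claim_equal_find_axis_column : Prop := ∀ (cols : List String) (axis : String), Dom_find_axis_column cols axis → Spec_find_axis_column cols axis (find_axis_column cols axis)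

-- ===== LEMMAS AND PROOFS =====

-- the left-biased min the loop body computes
def pvM (a b : Nat × Option String) : Nat × Option String := if b.1 < a.1 then b else a

theorem pvStep_eq_m (ax : List Char) (acc : Nat × Option String) (c : String) :
    pvStep ax acc c = pvM acc (pvRank ax c, some c) := rfl

theorem pvM_assoc (a b c : Nat × Option String) : pvM (pvM a b) c = pvM a (pvM b c) := by
  unfold pvM; split_ifs <;> first | rfl | omega

theorem pvRank_pos (ax : List Char) (c : String) : 1 ≤ pvRank ax c := by
  unfold pvRank; split_ifs <;> omega

theorem pvRank_le (ax : List Char) (c : String) : pvRank ax c ≤ 4 := by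
  unfold pvRank; split_ifs <;> omega

theorem pvStep_fst_le (ax : List Char) (a : Nat × Option String) (c : String)
    (h : a.1 ≤ 4) : (pvStep ax a c).1 ≤ 4 := by
  unfold pvStep; split_ifs
  · exact pvRank_le ax c
  · exact h

theorem pvStep_fst_pos (ax : List Char) (a : Nat × Option String) (c : String)
    (h : 1 ≤ a.1) : 1 ≤ (pvStep ax a c).1 := by
  unfold pvStep; split_ifs
  · exact pvRank_pos ax c
  · exact h

theorem pvFold_fst_le (ax : List Char) (l : List String) (a : Nat × Option String)
    (h : a.1 ≤ 4) : (l.foldl (pvStep ax) a).1 ≤ 4 := by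
  induction l generalizing a with
  | nil => simpa using h
  | cons c l ih => simpa using ih _ (pvStep_fst_le ax a c h)

theorem pvFold_fst_pos (ax : List Char) (l : List String) (a : Nat × Option String)
    (h : 1 ≤ a.1) : 1 ≤ (l.foldl (pvStep ax) a).1 := by
  induction l generalizing a with
  | nil => simpa using h
  | cons c l ih => simpa using ih _ (pvStep_fst_pos ax a c h)

-- factor the accumulator out of the fold
theorem pvFold_factor (ax : List Char) (l : List String) (a : Nat × Option String)
    (h : a.1 ≤ 4) :
    l.foldl (pvStep ax) a = pvM a (l.foldl (pvStep ax) (4, none)) := by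
  induction l generalizing a with
  | nil =>
    unfold pvM
    simp only [List.foldl_nil]
    split_ifs with h1
    · omega
    · rfl
  | cons c l ih =>
    simp only [List.foldl_cons]
    rw [ih _ (pvStep_fst_le ax a c h), ih _ (pvStep_fst_le ax (4, none) c (by simp))]
    rw [pvStep_eq_m, pvStep_eq_m]
    have hX := pvFold_fst_le ax l (4, none) (by simp)
    set X := l.foldl (pvStep ax) (4, none) with hXdef
    by_cases hr : pvRank ax c < 4
    · have : pvM (4, none) (pvRank ax c, some c) = (pvRank ax c, some c) := by
        unfold pvM; simp [hr]
      rw [this, pvM_assoc]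
    · have hr4 : pvRank ax c = 4 := by have := pvRank_le ax c; omega
      have h1 : pvM a (pvRank ax c, some c) = a := by
        unfold pvM; rw [hr4]; split_ifs with hh
        · omega
        · rfl
      have h2 : pvM (4, none) (pvRank ax c, some c) = (4, none) := by
        unfold pvM; rw [hr4]; simp
      rw [h1, h2]
      by_cases hX4 : X.1 < 4
      · unfold pvM; simp [hX4]
      · have : pvM (4, none) X = (4, none) := by unfold pvM; simp [hX4]
        rw [this]
        unfold pvM
        have hx : ¬ X.1 < a.1 := by omega
        have hy : ¬ (4:Nat) < a.1 := by omega
        simp [hx, hy]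

theorem pvRank_cases (ax : List Char) (c : String) :
    pvRank ax c = if pvP1 ax c then 1 else if pvP2 ax c then 2 else if pvP3 ax c then 3 else 4 := rfl

-- full characterisation of B's fold by A's four scans
theorem pvFold_char (ax : List Char) (l : List String) :
    l.foldl (pvStep ax) (4, none) =
      match l.find? (pvP1 ax) with
      | some d => (1, some d)
      | none =>
        match l.find? (pvP2 ax) with
        | some d => (2, some d)
        | none =>
          match l.find? (pvP3 ax) with
          | some d => (3, some d)
          | none => (4, none) := by
  induction l with
  | nil => simp
  | cons c l ih =>
    simp only [List.foldl_cons]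
    rw [pvFold_factor ax l _ (pvStep_fst_le ax (4, none) c (by simp))]
    rw [pvStep_eq_m]
    have hpos := pvFold_fst_pos ax l (4, none) (by simp)
    by_cases h1 : pvP1 ax c
    · have hr : pvRank ax c = 1 := by rw [pvRank_cases, if_pos h1]
      have hm : pvM (4, none) (pvRank ax c, some c) = (1, some c) := by
        unfold pvM; rw [hr]; simp
      rw [hm, ih] at *
      simp only [List.find?_cons, h1]
      rcases hf1 : l.find? (pvP1 ax) with _ | d <;>
        rcases hf2 : l.find? (pvP2 ax) with _ | d2 <;>
          rcases hf3 : l.find? (pvP3 ax) with _ | d3 <;>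
            simp_all [pvM]
    · have hc1 : (pvP1 ax c) = false := by simp [h1]
      by_cases h2 : pvP2 ax c
      · have hr : pvRank ax c = 2 := by rw [pvRank_cases, if_neg h1, if_pos h2]
        have hm : pvM (4, none) (pvRank ax c, some c) = (2, some c) := by
          unfold pvM; rw [hr]; simp
        rw [hm, ih]
        simp only [List.find?_cons, hc1, h2]
        rcases hf1 : l.find? (pvP1 ax) with _ | d <;>
          rcases hf2 : l.find? (pvP2 ax) with _ | d2 <;>
            rcases hf3 : l.find? (pvP3 ax) with _ | d3 <;>
              simp_all [pvM]
      · have hc2 : (pvP2 ax c) = false := by simp [h2]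
        by_cases h3 : pvP3 ax c
        · have hr : pvRank ax c = 3 := by rw [pvRank_cases, if_neg h1, if_neg h2, if_pos h3]
          have hm : pvM (4, none) (pvRank ax c, some c) = (3, some c) := by
            unfold pvM; rw [hr]; simp
          rw [hm, ih]
          simp only [List.find?_cons, hc1, hc2, h3]
          rcases hf1 : l.find? (pvP1 ax) with _ | d <;>
            rcases hf2 : l.find? (pvP2 ax) with _ | d2 <;>
              rcases hf3 : l.find? (pvP3 ax) with _ | d3 <;>
                simp_all [pvM]
        · have hc3 : (pvP3 ax c) = false := by simp [h3]
          have hr : pvRank ax c = 4 := by rw [pvRank_cases, if_neg h1, if_neg h2, if_neg h3]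
          have hm : pvM (4, none) (pvRank ax c, some c) = (4, none) := by
            unfold pvM; rw [hr]; simp
          rw [hm, ih]
          simp only [List.find?_cons, hc1, hc2, hc3]
          rcases hf1 : l.find? (pvP1 ax) with _ | d <;>
            rcases hf2 : l.find? (pvP2 ax) with _ | d2 <;>
              rcases hf3 : l.find? (pvP3 ax) with _ | d3 <;>
                simp_all [pvM]

-- A's fourth loop is dead: any single-char exact match is already an exact match
theorem pvP4_dead (ax : List Char) (l : List String)
    (h : l.find? (pvP1 ax) = none) : l.find? (pvP4 ax) = none := by
  rw [List.find?_eq_none] at h ⊢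
  intro x hx hc
  have hx1 := h x hx
  apply hx1
  simp only [pvP4, Bool.and_eq_true] at hc
  simp only [pvP1, hc.2]

-- ===== VERDICT (by name: the statement is the Claim_ definition above) =====
theorem find_axis_column_spec : Claim_equal_find_axis_column := by
  intro cols axis _
  unfold Spec_find_axis_column find_axis_column find_axis_column_alt
  rw [pvFold_char]
  rcases hf1 : cols.find? (pvP1 (PySem.Chars.lower axis.toList)) with _ | d
  · rcases hf2 : cols.find? (pvP2 (PySem.Chars.lower axis.toList)) with _ | d2
    · rcases hf3 : cols.find? (pvP3 (PySem.Chars.lower axis.toList)) with _ | d3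
      · simp [pvP4_dead _ _ hf1]
      · simp
    · simp
  · simp
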